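-- pv_equiv track=rewrite | github.com/AhmedShaiyan/AI-Worldle-Solver | Code/wordle.py | get_color_mapping
-- ===== SOURCE A (Python) =====
-- def get_color_mapping(guessed_word, target_word):
--     color_mapping = [0x3A3A3C] * len(guessed_word)
--     target_word_list = list(target_word)
--
--     # First pass for correct position (green)
--     for i, letter in enumerate(guessed_word):
--         if letter == target_word[i]:
--             color_mapping[i] = 0x6ca965  # Green
--             target_word_list[i] = None
--
--     # Second pass for wrong position (yellow)
--     for i, letter in enumerate(guessed_word):
--         if color_mapping[i] == 0x6ca965:
--             continue
--         if letter in target_word_list: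
--             color_mapping[i] = 0xc8b653  # Yellow
--             target_word_list[target_word_list.index(letter)] = None
--
--     return color_mapping
-- ===== SOURCE B (Python) =====
-- def get_color_mapping(guessed_word, target_word):
--     # Stateless per-position characterization: no mutable remaining-letters state.
--     # A position is yellow iff its rank among earlier non-green occurrences of its
--     # letter in the guess is below the number of non-green occurrences of that
--     # letter in the target (a greedy left-to-right assignment picks exactly those).
--     def color(i, ch):
--         if ch == target_word[i]:
--             return 0x6ca965
--         spare = len([j for j, t in enumerate(target_word)
--                      if t == ch and not (j < len(guessed_word) and guessed_word[j] == t)])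
--         rank = len([j for j in range(i)
--                     if guessed_word[j] == ch and guessed_word[j] != target_word[j]])
--         return 0xc8b653 if rank < spare else 0x3A3A3C
--     return [color(i, ch) for i, ch in enumerate(guessed_word)]
-- ===== Notes on version B (the rewrite author's own statement) =====
-- stated objective: alternative
-- what changed: Replaces A's stateful two-pass greedy that mutates a remaining-letters list (membership scan + list.index + in-place blanking) with a stateless per-position closed-form: each non-green position is yellow iff its rank among earlier non-green occurrences of its letter in the guess is below the count of non-green occurrences of that letter in the target.
import Mathlib
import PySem

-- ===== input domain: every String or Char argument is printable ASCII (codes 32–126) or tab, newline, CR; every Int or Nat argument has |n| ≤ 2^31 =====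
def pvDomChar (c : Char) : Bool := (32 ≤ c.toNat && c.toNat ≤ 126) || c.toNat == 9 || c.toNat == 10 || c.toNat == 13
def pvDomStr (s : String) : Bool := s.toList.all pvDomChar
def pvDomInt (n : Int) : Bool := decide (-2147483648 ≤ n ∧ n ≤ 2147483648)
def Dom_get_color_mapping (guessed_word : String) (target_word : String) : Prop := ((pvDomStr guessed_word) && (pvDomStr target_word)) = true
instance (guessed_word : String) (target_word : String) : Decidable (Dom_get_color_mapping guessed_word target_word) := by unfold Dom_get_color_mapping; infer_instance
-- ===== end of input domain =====

-- B replaces A's stateful two-pass greedy (mutating a remaining-letters list via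
-- membership scan, list.index and in-place blanking) with a stateless per-position
-- rank formula: a non-green position is yellow iff its rank among earlier non-green
-- occurrences of its letter in the guess is below the count of non-green occurrences
-- of that letter in the target; objective: alternative (same asymptotic cost).


-- ===== PORT A =====
def get_color_mapping (guessed_word : String) (target_word : String) : List Int :=
  let gl := guessed_word.toList
  let tl := target_word.toList
  -- color_mapping = [0x3A3A3C] * len(guessed_word); target_word_list = list(target_word) (None = none)
  let st0 : List Int × List (Option Char) := (List.replicate gl.length 0x3A3A3C, tl.map some)
  -- first pass (green); 'target_word[i]' raises IndexError when len(guessed) > len(target): Pre_ excludes that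
  let st1 := (PySem.List.enumerate gl).foldl
    (fun st p =>
      if PySem.List.pyGet? tl p.1 = some p.2 then
        (PySem.List.pySetD st.1 p.1 0x6ca965, PySem.List.pySetD st.2 p.1 none)
      else st) st0
  -- second pass (yellow)
  let st2 := (PySem.List.enumerate gl).foldl
    (fun (st : List Int × List (Option Char)) p =>
      if PySem.List.pyGetD st.1 p.1 0 = 0x6ca965 then st
      else if some p.2 ∈ st.2 then
        (PySem.List.pySetD st.1 p.1 0xc8b653,
         match PySem.List.index? st.2 (some p.2) with
         | some j => st.2.set j none
         | none => st.2)
      else st) st1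
  st2.1

-- ===== PORT B =====
-- color(i, ch) from Source B: stateless per-position decision
def pvColorB (gl tl : List Char) (i : Int) (ch : Char) : Int :=
  if PySem.List.pyGet? tl i = some ch then 0x6ca965
  else
    -- spare = len([j for j,t in enumerate(target_word) if t == ch and not (j < len(guessed_word) and guessed_word[j] == t)])
    let spare := ((PySem.List.enumerate tl).filter (fun q =>
      decide (q.2 = ch ∧ ¬ (q.1 < (gl.length : Int) ∧ PySem.List.pyGet? gl q.1 = some q.2)))).length
    -- rank = len([j for j in range(i) if guessed_word[j] == ch and guessed_word[j] != target_word[j]])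
    let rank := ((PySem.List.pyRange 0 i 1).filter (fun j =>
      decide (PySem.List.pyGet? gl j = some ch ∧ ¬ PySem.List.pyGet? gl j = PySem.List.pyGet? tl j))).length
    if (rank : Int) < (spare : Int) then 0xc8b653 else 0x3A3A3C

def get_color_mapping_alt (guessed_word : String) (target_word : String) : List Int :=
  let gl := guessed_word.toList
  let tl := target_word.toList
  (PySem.List.enumerate gl).map (fun p => pvColorB gl tl p.1 p.2)

-- ===== PRECONDITION & SPEC =====
-- Both A and B evaluate 'target_word[i]' for every guess index i and so raise
-- IndexError exactly when the guess is longer than the target.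
def Pre_get_color_mapping (guessed_word : String) (target_word : String) : Prop :=
  guessed_word.toList.length ≤ target_word.toList.length
instance (guessed_word : String) (target_word : String) : Decidable (Pre_get_color_mapping guessed_word target_word) := by unfold Pre_get_color_mapping; infer_instance
def pvWitness_get_color_mapping : String × String := ("raise", "crane")

def Spec_get_color_mapping (guessed_word : String) (target_word : String) (out : List Int) : Prop := out = get_color_mapping_alt guessed_word target_word
instance (guessed_word : String) (target_word : String) (out : List Int) : Decidable (Spec_get_color_mapping guessed_word target_word out) := by unfold Spec_get_color_mapping; infer_instance

-- ===== CLAIM (what is proved, stated in full; the proofs are below) =====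
def Claim_equal_get_color_mapping : Prop := ∀ (guessed_word : String) (target_word : String), Dom_get_color_mapping guessed_word target_word → Pre_get_color_mapping guessed_word target_word → Spec_get_color_mapping guessed_word target_word (get_color_mapping guessed_word target_word)

-- ===== LEMMAS AND PROOFS =====

-- pass-1 value of the colour at guess position k (k < gl.length)
def c1 (gl tl : List Char) (k : Nat) : Int := if tl[k]? = gl[k]? then 0x6ca965 else 0x3A3A3C
-- remaining target letter at position j after pass 1
def t1 (gl tl : List Char) (j : Nat) : Option Char := if gl[j]? = tl[j]? then none else tl[j]?
-- number of non-green occurrences of c in the target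
def tot (gl tl : List Char) (c : Char) : Nat :=
  ((List.range tl.length).map (fun j => t1 gl tl j)).count (some c)
-- number of non-green guess positions j < s carrying letter c
def pref (gl tl : List Char) (c : Char) (s : Nat) : Nat :=
  (List.range s).countP (fun j => decide (gl[j]? = some c ∧ ¬ gl[j]? = tl[j]?))
-- the common closed-form colour at position k
def F (gl tl : List Char) (k : Nat) : Int :=
  if tl[k]? = gl[k]? then 0x6ca965
  else if pref gl tl (gl.getD k 'a') k < tot gl tl (gl.getD k 'a') then 0xc8b653 else 0x3A3A3C

theorem map_range_shift {α : Type} (f : Nat → α) (s n : Nat) :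
    (List.range (n+1)).map (fun k => f (s + k)) = f s :: (List.range n).map (fun k => f (s + 1 + k)) := by
  simp only [List.range_succ_eq_map, List.map_cons, List.map_map, Nat.add_zero]
  congr 1
  apply List.map_congr_left
  intro k _
  simp only [Function.comp]
  congr 1
  omega

theorem drop_map_some_eq_t1 (gl tl : List Char) (s : Nat) (h : gl.length ≤ s) :
    (tl.map some).drop s = (List.range (tl.length - s)).map (fun j => t1 gl tl (s + j)) := by
  apply List.ext_getElem?
  intro i
  rw [List.getElem?_drop, List.getElem?_map]
  by_cases hi : s + i < tl.length
  · rw [List.getElem?_map, List.getElem?_range (by omega), List.getElem?_eq_getElem hi]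
    simp only [Option.map_some, t1]
    rw [List.getElem?_eq_none (by omega : gl.length ≤ s + i), List.getElem?_eq_getElem hi]
    simp
  · rw [List.getElem?_eq_none (by omega : tl.length ≤ s + i), List.getElem?_map,
        List.getElem?_eq_none (l := List.range (tl.length - s)) (by simp; omega)]
    simp

theorem pass1_go (gl tl : List Char) (hlen : gl.length ≤ tl.length) :
    ∀ (suf : List Char) (s : Nat) (cpre : List Int) (tpre : List (Option Char)),
    cpre.length = s → tpre.length = s → gl.drop s = suf →
    (PySem.List.enumerate suf (s : Int)).foldl
      (fun st p =>
        if PySem.List.pyGet? tl p.1 = some p.2 then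
          (PySem.List.pySetD st.1 p.1 0x6ca965, PySem.List.pySetD st.2 p.1 none)
        else st)
      (cpre ++ List.replicate suf.length 0x3A3A3C, tpre ++ (tl.map some).drop s)
    = (cpre ++ (List.range suf.length).map (fun k => c1 gl tl (s + k)),
       tpre ++ (List.range (tl.length - s)).map (fun j => t1 gl tl (s + j))) := by
  intro suf
  induction suf with
  | nil =>
    intro s cpre tpre hc ht hdrop
    have hs : gl.length ≤ s := by
      have := congrArg List.length hdrop; simp [List.length_drop] at this; omega
    simp only [PySem.List.enumerate]
    simp [List.foldl_nil, drop_map_some_eq_t1 gl tl s hs]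
  | cons c rest ih =>
    intro s cpre tpre hc ht hdrop
    have hslt : s < gl.length := by
      have := congrArg List.length hdrop; simp [List.length_drop] at this; omega
    have hstl : s < tl.length := lt_of_lt_of_le hslt hlen
    have hgs : gl[s]? = some c := by
      have h0 : (gl.drop s)[0]? = some c := by rw [hdrop]; rfl
      rwa [List.getElem?_drop, Nat.add_zero] at h0
    have hdrest : gl.drop (s+1) = rest := by
      have := congrArg (List.drop 1) hdrop
      simpa [List.drop_drop, Nat.add_comm] using this
    have htls : tl[s]? = some (tl[s]'hstl) := List.getElem?_eq_getElem hstl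
    have hdm : (tl.map some).drop s = some (tl[s]'hstl) :: (tl.map some).drop (s+1) := by
      rw [List.drop_eq_getElem_cons (by simpa using hstl)]
      simp
    rw [PySem.List.enumerate_cons, List.foldl_cons]
    have hcast : (s : Int) + 1 = ((s + 1 : Nat) : Int) := by push_cast; ring
    have hpg : PySem.List.pyGet? tl (s : Int) = some (tl[s]'hstl) := by
      rw [PySem.List.pyGet?_natCast, htls]
    by_cases hhit : tl[s]? = gl[s]?
    · -- green
      have hceq : (tl[s]'hstl) = c := by rw [hgs] at hhit; simpa [htls] using hhit
      have hc1 : c1 gl tl s = 0x6ca965 := by simp [c1, hhit]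
      have ht1 : t1 gl tl s = none := by simp [t1, hhit.symm]
      rw [hdm]
      simp only [List.length_cons, List.replicate_succ]
      rw [if_pos (show PySem.List.pyGet? tl ((s : Int)) = some c by rw [hpg, hceq])]
      simp only [PySem.List.pySetD_natCast]
      have hset1 : (cpre ++ (0x3A3A3C : Int) :: List.replicate rest.length 0x3A3A3C).set s 0x6ca965
            = cpre ++ (0x6ca965 : Int) :: List.replicate rest.length 0x3A3A3C := by subst hc; simp
      have hset2 : (tpre ++ some (tl[s]'hstl) :: (tl.map some).drop (s+1)).set s none
            = tpre ++ none :: (tl.map some).drop (s+1) := by subst ht; simp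
      rw [hset1, hset2]
      rw [List.append_cons cpre, List.append_cons tpre, hcast]
      rw [ih (s+1) (cpre ++ [0x6ca965]) (tpre ++ [none]) (by simp [hc]) (by simp [ht]) hdrest]
      rw [map_range_shift (c1 gl tl) s rest.length,
          show tl.length - s = (tl.length - (s+1)) + 1 by omega,
          map_range_shift (t1 gl tl) s (tl.length - (s+1)), hc1, ht1]
      simp
    · -- not green
      have hne : ¬ (some (tl[s]'hstl) = some c) := by
        intro h
        exact hhit (by rw [htls, hgs, h])
      have hc1 : c1 gl tl s = 0x3A3A3C := by simp [c1, hhit]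
      have ht1 : t1 gl tl s = some (tl[s]'hstl) := by
        unfold t1
        rw [if_neg (fun h => hhit h.symm), htls]
      rw [hdm]
      simp only [List.length_cons, List.replicate_succ]
      rw [if_neg (show ¬ PySem.List.pyGet? tl ((s : Int)) = some c by rw [hpg]; exact hne)]
      rw [List.append_cons cpre, List.append_cons tpre, hcast]
      rw [ih (s+1) (cpre ++ [0x3A3A3C]) (tpre ++ [some (tl[s]'hstl)]) (by simp [hc]) (by simp [ht]) hdrest]
      rw [map_range_shift (c1 gl tl) s rest.length,
          show tl.length - s = (tl.length - (s+1)) + 1 by omega,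
          map_range_shift (t1 gl tl) s (tl.length - (s+1)), hc1, ht1]
      simp

theorem remove_counts (twl : List (Option Char)) (c : Char) (j : Nat)
    (hj : PySem.List.index? twl (some c) = some j) (c' : Char) :
    (((twl.set j none).count (some c') : Int))
      = (twl.count (some c') : Int) - (if c' = c then 1 else 0) := by
  rcases (PySem.List.index?_eq_some_iff twl (some c) j).mp hj with ⟨pre, suf, hsplit, hlen, -⟩
  subst hsplit
  have hset : (pre ++ some c :: suf).set j none = pre ++ none :: suf := by
    subst hlen; simp
  rw [hset]
  by_cases hcc : c' = c
  · subst hcc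
    simp [List.count_append]
    ring
  · have h1 : ¬ ((some c : Option Char) = some c') := by
      intro h; exact hcc (Option.some.inj h).symm
    simp [List.count_append, h1, hcc]

-- update a map-over-range at one index
theorem set_map_range {α : Type} (n s : Nat) (_hs : s < n) (G G' : Nat → α) (v : α)
    (hv : G' s = v) (hk : ∀ k, k ≠ s → G k = G' k) :
    ((List.range n).map G).set s v = (List.range n).map G' := by
  apply List.ext_getElem (by simp)
  intro i h1 h2
  simp only [List.getElem_set, List.getElem_map, List.getElem_range]
  by_cases hi : i = s
  · simp [hi, hv]
  · rw [if_neg (fun h : s = i => hi (Eq.symm h))]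
    exact hk i hi

theorem pref_succ (gl tl : List Char) (c : Char) (s : Nat) :
    pref gl tl c (s+1)
      = pref gl tl c s + (if gl[s]? = some c ∧ ¬ gl[s]? = tl[s]? then 1 else 0) := by
  unfold pref
  rw [List.range_succ, List.countP_append]
  simp

theorem pass2F (gl tl : List Char) (hlen : gl.length ≤ tl.length) :
    ∀ (suf : List Char) (s : Nat) (twl : List (Option Char)),
    gl.drop s = suf →
    (∀ c : Char, (twl.count (some c) : Int)
        = (tot gl tl c : Int) - (min (pref gl tl c s) (tot gl tl c) : Int)) →
    ((PySem.List.enumerate suf (s : Int)).foldl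
      (fun (st : List Int × List (Option Char)) p =>
        if PySem.List.pyGetD st.1 p.1 0 = 0x6ca965 then st
        else if some p.2 ∈ st.2 then
          (PySem.List.pySetD st.1 p.1 0xc8b653,
           match PySem.List.index? st.2 (some p.2) with
           | some j => st.2.set j none
           | none => st.2)
        else st)
      ((List.range gl.length).map (fun k => if k < s then F gl tl k else c1 gl tl k), twl)).1
    = (List.range gl.length).map (F gl tl) := by
  intro suf
  induction suf with
  | nil =>
    intro s twl hdrop _
    have hs : gl.length ≤ s := by
      have := congrArg List.length hdrop; simp [List.length_drop] at this; omega
    simp only [PySem.List.enumerate, List.foldl_nil]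
    apply List.map_congr_left
    intro k hk
    rw [List.mem_range] at hk
    rw [if_pos (by omega)]
  | cons c rest ih =>
    intro s twl hdrop hinv
    have hslt : s < gl.length := by
      have := congrArg List.length hdrop; simp [List.length_drop] at this; omega
    have hstl : s < tl.length := lt_of_lt_of_le hslt hlen
    have hgs : gl[s]? = some c := by
      have h0 : (gl.drop s)[0]? = some c := by rw [hdrop]; rfl
      rwa [List.getElem?_drop, Nat.add_zero] at h0
    have hdrest : gl.drop (s+1) = rest := by
      have := congrArg (List.drop 1) hdrop
      simpa [List.drop_drop, Nat.add_comm] using this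
    have hgd : gl.getD s 'a' = c := by
      rw [List.getD_eq_getElem?_getD, hgs]; rfl
    have hcast : (s : Int) + 1 = ((s + 1 : Nat) : Int) := by push_cast; ring
    rw [PySem.List.enumerate_cons, List.foldl_cons, hcast]
    have hread : PySem.List.pyGetD
        ((List.range gl.length).map (fun k => if k < s then F gl tl k else c1 gl tl k)) ((s : Int)) 0
        = c1 gl tl s := by
      rw [PySem.List.pyGetD_natCast, List.getD_eq_getElem?_getD]
      rw [List.getElem?_map, List.getElem?_range hslt]
      simp
    by_cases hhit : tl[s]? = gl[s]?
    · -- green: A skips; F s = c1 s = green, pref unchanged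
      have hc1 : c1 gl tl s = 0x6ca965 := by simp [c1, hhit]
      rw [if_pos (by rw [hread, hc1])]
      have hmap : (List.range gl.length).map (fun k => if k < s then F gl tl k else c1 gl tl k)
          = (List.range gl.length).map (fun k => if k < s + 1 then F gl tl k else c1 gl tl k) := by
        apply List.map_congr_left
        intro k _
        by_cases hks : k = s
        · subst hks
          rw [if_neg (by omega), if_pos (by omega)]
          simp [F, c1, hhit]
        · by_cases hk : k < s
          · rw [if_pos hk, if_pos (by omega)]
          · rw [if_neg hk, if_neg (by omega)]
      rw [hmap]
      refine ih (s+1) twl hdrest ?_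
      intro c'
      rw [hinv c']
      have : pref gl tl c' (s+1) = pref gl tl c' s := by
        rw [pref_succ]
        rw [if_neg (by rintro ⟨-, h2⟩; exact h2 hhit.symm)]
        omega
      rw [this]
    · -- not green
      have hc1 : c1 gl tl s = 0x3A3A3C := by simp [c1, hhit]
      rw [if_neg (by rw [hread, hc1]; decide)]
      have hmem_iff : some c ∈ twl ↔ pref gl tl c s < tot gl tl c := by
        rw [← List.count_pos_iff]
        constructor
        · intro h
          have := hinv c
          by_contra hnl
          have : min (pref gl tl c s) (tot gl tl c) = tot gl tl c := by omega
          omega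
        · intro h
          have := hinv c
          have : min (pref gl tl c s) (tot gl tl c) = pref gl tl c s := by omega
          omega
      by_cases hyel : pref gl tl c s < tot gl tl c
      · -- yellow
        have hmem : some c ∈ twl := hmem_iff.mpr hyel
        rw [if_pos hmem]
        obtain ⟨j, hj⟩ : ∃ j, PySem.List.index? twl (some c) = some j := by
          rcases Option.isSome_iff_exists.mp ((PySem.List.index?_isSome_iff twl (some c)).mpr hmem) with ⟨j, hj⟩
          exact ⟨j, hj⟩
        rw [hj]
        simp only [PySem.List.pySetD_natCast]
        have hFs : F gl tl s = 0xc8b653 := by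
          unfold F
          rw [if_neg hhit, hgd, if_pos hyel]
        rw [set_map_range gl.length s hslt _
            (fun k => if k < s + 1 then F gl tl k else c1 gl tl k) _
            (by simp [hFs])
            (by
              intro k hks
              have hiff : k < s ↔ k < s + 1 := by omega
              simp [hiff])]
        refine ih (s+1) (twl.set j none) hdrest ?_
        intro c'
        rw [remove_counts twl c j hj c', hinv c']
        by_cases hcc : c' = c
        · subst hcc
          rw [if_pos rfl, pref_succ, if_pos ⟨hgs, fun h => hhit h.symm⟩]
          omega
        · rw [if_neg hcc, pref_succ,
              if_neg (by rintro ⟨h1, -⟩; rw [hgs] at h1; exact hcc (Option.some.inj h1).symm)]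
          omega
      · -- gray: F s = c1 s = gray
        rw [if_neg (fun h => hyel (hmem_iff.mp h))]
        have hmap : (List.range gl.length).map (fun k => if k < s then F gl tl k else c1 gl tl k)
            = (List.range gl.length).map (fun k => if k < s + 1 then F gl tl k else c1 gl tl k) := by
          apply List.map_congr_left
          intro k _
          by_cases hks : k = s
          · subst hks
            rw [if_neg (by omega), if_pos (by omega)]
            unfold F c1
            rw [if_neg hhit, if_neg hhit, hgd, if_neg hyel]
          · by_cases hk : k < s
            · rw [if_pos hk, if_pos (by omega)]
            · rw [if_neg hk, if_neg (by omega)]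
        rw [hmap]
        refine ih (s+1) twl hdrest ?_
        intro c'
        rw [hinv c']
        by_cases hcc : c' = c
        · subst hcc
          rw [pref_succ, if_pos ⟨hgs, fun h => hhit h.symm⟩]
          omega
        · rw [pref_succ,
              if_neg (by rintro ⟨h1, -⟩; rw [hgs] at h1; exact hcc (Option.some.inj h1).symm)]
          omega

-- A's result is the closed-form colour map
theorem a_eq_F (g t : String) (hlen : g.toList.length ≤ t.toList.length) :
    get_color_mapping g t = (List.range g.toList.length).map (F g.toList t.toList) := by
  simp only [get_color_mapping]
  have h1 := pass1_go g.toList t.toList hlen g.toList 0 [] [] rfl rfl rfl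
  simp only [Nat.cast_zero, List.nil_append, List.drop_zero] at h1
  rw [h1]
  have hmap0 : (List.range g.toList.length).map (fun k => c1 g.toList t.toList (0 + k))
      = (List.range g.toList.length).map (fun k => if k < 0 then F g.toList t.toList k else c1 g.toList t.toList k) := by
    apply List.map_congr_left
    intro k _
    rw [if_neg (by omega), Nat.zero_add]
  have hinv0 : ∀ c : Char,
      ((((List.range (t.toList.length - 0)).map (fun j => t1 g.toList t.toList (0 + j))).count (some c) : Int))
        = (tot g.toList t.toList c : Int)
          - (min (pref g.toList t.toList c 0) (tot g.toList t.toList c) : Int) := by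
    intro c
    have : pref g.toList t.toList c 0 = 0 := by simp [pref]
    rw [this]
    simp only [Nat.sub_zero, Nat.zero_add, tot]
    simp
  rw [hmap0]
  exact pass2F g.toList t.toList hlen g.toList 0 _ rfl hinv0

-- enumerate as a map over range (with a harmless default for the in-range lookup)
theorem enum_eq {α : Type} (d : α) (xs : List α) : ∀ (s : Nat),
    PySem.List.enumerate xs (s : Int)
      = (List.range xs.length).map (fun j => (((s + j : Nat) : Int), xs.getD j d)) := by
  induction xs with
  | nil => intro s; simp [PySem.List.enumerate]
  | cons x rest ih =>
    intro s
    rw [PySem.List.enumerate_cons, show (s:Int)+1 = ((s+1:Nat):Int) by push_cast; ring, ih (s+1)]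
    simp only [List.length_cons, List.range_succ_eq_map, List.map_cons, List.map_map]
    congr 1
    apply List.map_congr_left
    intro k _
    simp only [Function.comp_apply, List.getD_cons_succ]
    congr 2
    omega

theorem count_map_countP {α : Type} [BEq α] (l : List Nat) (g : Nat → α) (a : α) :
    (l.map g).count a = l.countP (fun j => g j == a) := by
  rw [List.count, List.countP_map]
  rfl

-- B's 'spare' comprehension counts exactly the non-green target occurrences
theorem spare_eq (gl tl : List Char) (c : Char) :
    ((PySem.List.enumerate tl).filter (fun q =>
      decide (q.2 = c ∧ ¬ (q.1 < (gl.length : Int) ∧ PySem.List.pyGet? gl q.1 = some q.2)))).length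
    = tot gl tl c := by
  have he := enum_eq 'a' tl 0
  simp only [Nat.cast_zero] at he
  rw [he, List.filter_map, List.length_map, ← List.countP_eq_length_filter]
  unfold tot
  rw [count_map_countP]
  apply List.countP_congr
  intro j hj
  have hjlt := List.mem_range.mp hj
  have htj : tl.getD j 'a' = tl[j]'hjlt := List.getD_eq_getElem tl 'a' hjlt
  have htj? : tl[j]? = some (tl[j]'hjlt) := List.getElem?_eq_getElem hjlt
  simp only [Function.comp_apply, Nat.zero_add, PySem.List.pyGet?_natCast, htj]
  by_cases hhit : gl[j]? = tl[j]?
  · have h1 : gl[j]? = some (tl[j]'hjlt) := by rw [hhit, htj?]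
    have hlt : (j : Int) < (gl.length : Int) := by
      rcases List.getElem?_eq_some_iff.mp h1 with ⟨h, -⟩
      exact_mod_cast h
    have ht1 : t1 gl tl j = none := by simp [t1, hhit]
    simp [ht1, hlt, h1]
  · have ht1 : t1 gl tl j = some (tl[j]'hjlt) := by
      unfold t1
      rw [if_neg hhit, htj?]
    have h1 : ¬ gl[j]? = some (tl[j]'hjlt) := by rw [← htj?]; exact hhit
    by_cases hc : tl[j]'hjlt = c
    · subst hc
      simp [ht1]
      exact Or.inr h1
    · simp [ht1, hc]

-- B's 'rank' comprehension counts exactly the earlier non-green guess occurrences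
theorem rank_eq (gl tl : List Char) (c : Char) (i : Nat) :
    ((PySem.List.pyRange 0 (i : Int) 1).filter (fun j =>
      decide (PySem.List.pyGet? gl j = some c ∧ ¬ PySem.List.pyGet? gl j = PySem.List.pyGet? tl j))).length
    = pref gl tl c i := by
  rw [PySem.List.pyRange_one]
  simp only [Int.sub_zero, Int.toNat_natCast]
  rw [List.filter_map, List.length_map, ← List.countP_eq_length_filter]
  unfold pref
  apply List.countP_congr
  intro j _
  simp only [Function.comp_apply, zero_add, PySem.List.pyGet?_natCast]

-- B's per-position decision is the closed-form colour
theorem colorB_eq_F (gl tl : List Char) (i : Nat) (hi : i < gl.length) :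
    pvColorB gl tl (i : Int) (gl[i]'hi) = F gl tl i := by
  unfold pvColorB F
  rw [PySem.List.pyGet?_natCast]
  have hgi : gl[i]? = some (gl[i]'hi) := List.getElem?_eq_getElem hi
  have hgd : gl.getD i 'a' = gl[i]'hi := List.getD_eq_getElem gl 'a' hi
  by_cases hhit : tl[i]? = gl[i]?
  · rw [if_pos (by rw [hhit, hgi]), if_pos hhit]
  · rw [if_neg (by rw [← hgi]; exact hhit), if_neg hhit]
    simp only [spare_eq gl tl (gl[i]'hi), rank_eq gl tl (gl[i]'hi) i, hgd]
    by_cases h : pref gl tl (gl[i]'hi) i < tot gl tl (gl[i]'hi)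
    · rw [if_pos (by exact_mod_cast h), if_pos h]
    · rw [if_neg (by exact_mod_cast h), if_neg h]

-- B's result is the same closed-form colour map
theorem b_eq_F (g t : String) :
    get_color_mapping_alt g t = (List.range g.toList.length).map (F g.toList t.toList) := by
  simp only [get_color_mapping_alt]
  apply List.ext_getElem (by simp)
  intro i h1 h2
  simp only [List.getElem_map, PySem.List.getElem_enumerate, zero_add, List.getElem_range]
  have hi : i < g.toList.length := by simpa using h1
  exact colorB_eq_F g.toList t.toList i hi

-- ===== VERDICT (by name: the statement is the Claim_ definition above) =====
theorem get_color_mapping_spec : Claim_equal_get_color_mapping := by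
  intro g t _hdom hpre
  unfold Pre_get_color_mapping at hpre
  unfold Spec_get_color_mapping
  rw [a_eq_F g t hpre, b_eq_F g t]
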